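-- pv_equiv track=rewrite | github.com/proru/async_python | codewars/maskify.py | dirReduc2
-- ===== SOURCE A (Python) =====
-- opposite = {'NORTH': 'SOUTH', 'EAST': 'WEST', 'SOUTH': 'NORTH', 'WEST': 'EAST'}
--
-- def dirReduc2(plan):
--     new_plan = []
--     for d in plan:
--         if new_plan and new_plan[-1] == opposite[d]:
--             new_plan.pop()
--         else:
--             new_plan.append(d)
--     return new_plan
-- ===== SOURCE B (Python) =====
-- opposite = {'NORTH': 'SOUTH', 'EAST': 'WEST', 'SOUTH': 'NORTH', 'WEST': 'EAST'}
--
-- def dirReduc2(plan):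
--     lst = list(plan)
--     while True:
--         for i in range(len(lst) - 1):
--             if opposite[lst[i]] == lst[i + 1]:
--                 del lst[i:i + 2]
--                 break
--         else:
--             return lst
-- ===== Notes on version B (the rewrite author's own statement) =====
-- stated objective: alternative
-- what changed: B replaces A's one-pass stack (push, pop on cancellation) by fixed-point rewriting: repeatedly find the first adjacent opposite pair, delete it, and rescan until no pair remains; equality rests on confluence of the cancellation rewriting. Pre_ excludes plans containing a string that is not one of the four directions: there both programs raise KeyError except when their incidental lookup order happens to skip the invalid entry (A never looks up an element pushed onto an empty stack, B never looks up a trailing element), so which of them raises is an accident of implementation.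
-- outside the precondition, e.g. on dirReduc2(['OU', 'WEST']): A returns ['OU', 'WEST'], B raises KeyError; on dirReduc2(['OU']): A returns ['OU'], B returns ['OU']
import Mathlib
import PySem

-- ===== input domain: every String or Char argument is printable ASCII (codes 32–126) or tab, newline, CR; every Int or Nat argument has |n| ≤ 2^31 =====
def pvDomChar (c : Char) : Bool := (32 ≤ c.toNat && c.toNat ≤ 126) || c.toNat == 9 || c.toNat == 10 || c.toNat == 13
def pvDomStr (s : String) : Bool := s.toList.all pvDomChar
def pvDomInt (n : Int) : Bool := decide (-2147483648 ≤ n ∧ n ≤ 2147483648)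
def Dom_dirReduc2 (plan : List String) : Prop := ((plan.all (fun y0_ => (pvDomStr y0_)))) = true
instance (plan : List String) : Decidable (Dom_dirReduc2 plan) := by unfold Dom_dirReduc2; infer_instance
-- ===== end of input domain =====

-- B replaces A's one-pass stack by fixed-point deletion of the first adjacent opposite
-- pair ('alternative' objective); return values proved equal on valid plans.

-- the module-level dict `opposite`
def oppositeDict : PySem.Dict String String :=
  PySem.Dict.ofList [("NORTH", "SOUTH"), ("EAST", "WEST"), ("SOUTH", "NORTH"), ("WEST", "EAST")]

-- ===== PORT A =====
-- one iteration of A's for-loop body (new_plan[-1] → getLast?, pop → dropLast, append)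
def aStep (newPlan : List String) (d : String) : List String :=
  if newPlan ≠ [] ∧ newPlan.getLast? = oppositeDict.get? d then newPlan.dropLast
  else newPlan ++ [d]

def dirReduc2 (plan : List String) : List String :=
  plan.foldl aStep []

-- ===== PORT B =====
-- Source B's inner for-loop: first index i with opposite[lst[i]] == lst[i+1]
-- (get? = some matches the Python comparison exactly wherever the Python returns;
--  a KeyError on an invalid direction is outside Pre_)
def findPair : List String → Option Nat
  | x :: y :: rest =>
      if oppositeDict.get? x = some y then some 0
      else (findPair (y :: rest)).map (· + 1)
  | _ => none

theorem findPair_le : ∀ {l : List String} {i : Nat}, findPair l = some i → i + 2 ≤ l.length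
  | x :: y :: rest, i, h => by
    rw [findPair] at h
    split at h
    · simp only [Option.some.injEq] at h
      subst h; simp
    · simp only [Option.map_eq_some_iff] at h
      obtain ⟨j, hj, rfl⟩ := h
      have := findPair_le hj
      simpa using Nat.succ_le_succ this

-- Source B's while-True loop: delete lst[i:i+2] and rescan, or return when no pair found
def bLoop (lst : List String) : List String :=
  match hfp : findPair lst with
  | some i => bLoop (lst.take i ++ lst.drop (i + 2))
  | none => lst
termination_by lst.length
decreasing_by
  have h2 := findPair_le hfp
  simp only [List.length_append, List.length_take, List.length_drop]
  omega

def dirReduc2_alt (plan : List String) : List String :=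
  bLoop plan

-- ===== PRECONDITION & SPEC =====
-- Pre_ excludes the plans containing a string that is not one of the four directions:
-- there both programs raise KeyError except when their incidental lookup order happens
-- to skip the invalid entry (A never looks up an element pushed onto an empty stack,
-- B never looks up a trailing element), so which of them raises is an accident of
-- implementation.
def Pre_dirReduc2 (plan : List String) : Prop :=
  ∀ d ∈ plan, d = "NORTH" ∨ d = "SOUTH" ∨ d = "EAST" ∨ d = "WEST"
instance (plan : List String) : Decidable (Pre_dirReduc2 plan) := by
  unfold Pre_dirReduc2; infer_instance

def pvWitness_dirReduc2 : List String := ["NORTH", "EAST", "WEST", "SOUTH", "WEST"]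

def Spec_dirReduc2 (plan : List String) (out : List String) : Prop := out = dirReduc2_alt plan
instance (plan : List String) (out : List String) : Decidable (Spec_dirReduc2 plan out) := by
  unfold Spec_dirReduc2; infer_instance

-- ===== CLAIM (what is proved, stated in full; the proofs are below) =====
def Claim_equal_dirReduc2 : Prop :=
  ∀ (plan : List String), Dom_dirReduc2 plan → Pre_dirReduc2 plan →
    Spec_dirReduc2 plan (dirReduc2 plan)

-- ===== LEMMAS AND PROOFS =====

-- the opposite relation is symmetric
theorem opp_symm {x y : String} (h : oppositeDict.get? x = some y) :
    oppositeDict.get? y = some x := by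
  have hit : oppositeDict.items =
      [("NORTH", "SOUTH"), ("EAST", "WEST"), ("SOUTH", "NORTH"), ("WEST", "EAST")] := by decide
  have hm := PySem.Dict.mem_items_of_get?_eq_some oppositeDict h
  rw [hit] at hm
  simp only [List.mem_cons, List.not_mem_nil, or_false, Prod.mk.injEq] at hm
  rcases hm with ⟨rfl, rfl⟩ | ⟨rfl, rfl⟩ | ⟨rfl, rfl⟩ | ⟨rfl, rfl⟩ <;> decide

-- "no adjacent opposite pair"
def NR (l : List String) : Prop :=
  l.IsChain (fun x y => oppositeDict.get? x ≠ some y)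

-- an adjacent pair inside a redex-free list is never opposite
theorem nr_middle {a : List String} {z y : String} {t : List String}
    (h : NR (a ++ z :: y :: t)) : oppositeDict.get? z ≠ some y :=
  (List.isChain_append_cons_cons.mp h).2.1

theorem findPair_none_iff {l : List String} : findPair l = none ↔ NR l := by
  induction l with
  | nil => simp [findPair, NR]
  | cons x t ih =>
    match t with
    | [] => simp [findPair, NR]
    | y :: rest =>
      rw [findPair, NR, List.isChain_cons_cons]
      split
      · rename_i hxy
        simp [hxy]
      · rename_i hxy
        simp only [Option.map_eq_none_iff]
        rw [ih]
        simp [NR, hxy]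

-- a redex-free stack stays redex-free under A's step
theorem aStep_NR {acc : List String} (h : NR acc) (d : String) : NR (aStep acc d) := by
  unfold aStep
  split
  · exact List.IsChain.prefix h (List.dropLast_prefix acc)
  · rename_i hc
    refine List.isChain_append.mpr ⟨h, List.isChain_singleton d, ?_⟩
    intro p hp q hq
    simp only [List.head?_cons, Option.mem_def, Option.some.injEq] at hq
    subst hq
    intro hopp
    rcases List.eq_nil_or_concat acc with rfl | ⟨a', z, rfl⟩
    · simp at hp
    · simp only [List.concat_eq_append, List.getLast?_concat, Option.mem_def,
        Option.some.injEq] at hp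
      subst hp
      exact hc ⟨by simp, by rw [List.concat_eq_append, opp_symm hopp, List.getLast?_concat]⟩

-- cancelling an opposite pair against a redex-free stack undoes one push or pops once
theorem aStep_pop {acc : List String} {x y : String} (hnr : NR acc)
    (hxy : oppositeDict.get? x = some y) : aStep (aStep acc x) y = acc := by
  by_cases hc : acc ≠ [] ∧ acc.getLast? = oppositeDict.get? x
  · have h1 : aStep acc x = acc.dropLast := by rw [aStep, if_pos hc]
    rw [h1]
    rcases List.eq_nil_or_concat acc with rfl | ⟨a', z, rfl⟩
    · exact absurd rfl hc.1
    · simp only [List.concat_eq_append] at *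
      have hz : z = y := by
        have := hc.2
        rw [hxy, List.getLast?_concat] at this
        simpa using this
      subst hz
      simp only [List.dropLast_concat]
      rw [aStep]
      split
      · rename_i hc2
        exfalso
        obtain ⟨hne, hlast⟩ := hc2
        rcases List.eq_nil_or_concat a' with rfl | ⟨a'', w, rfl⟩
        · exact hne rfl
        · simp only [List.concat_eq_append, List.getLast?_concat] at hlast
          have hw : oppositeDict.get? w = some z := opp_symm hlast.symm
          exact nr_middle (a := a'') (by simpa [List.append_assoc] using hnr) hw
      · rfl
  · have h1 : aStep acc x = acc ++ [x] := by rw [aStep, if_neg hc]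
    rw [h1, aStep, if_pos ⟨by simp, by rw [List.getLast?_concat, opp_symm hxy]⟩]
    simp

theorem foldl_NR (u : List String) {acc : List String} (h : NR acc) :
    NR (List.foldl aStep acc u) := by
  induction u generalizing acc with
  | nil => exact h
  | cons d t ih => exact ih (aStep_NR h d)

-- A's fold leaves a redex-free input untouched
theorem foldl_of_NR (l : List String) : ∀ {acc : List String}, NR (acc ++ l) →
    List.foldl aStep acc l = acc ++ l := by
  induction l with
  | nil => intro acc _; simp
  | cons d t ih =>
    intro acc h
    have hpush : aStep acc d = acc ++ [d] := by
      rw [aStep, if_neg]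
      rintro ⟨hne, hlast⟩
      rcases List.eq_nil_or_concat acc with rfl | ⟨a', z, rfl⟩
      · exact hne rfl
      · simp only [List.concat_eq_append, List.getLast?_concat] at hlast
        have hz : oppositeDict.get? z = some d := opp_symm hlast.symm
        exact nr_middle (a := a') (by simpa [List.append_assoc] using h) hz
    rw [List.foldl_cons, hpush, ih (by simpa [List.append_assoc] using h)]
    simp

-- deleting an adjacent opposite pair does not change A's fold
theorem del_invariant (u v : List String) {x y : String}
    (hxy : oppositeDict.get? x = some y) :
    List.foldl aStep [] (u ++ x :: y :: v) = List.foldl aStep [] (u ++ v) := by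
  rw [List.foldl_append, List.foldl_append]
  have hnr : NR (List.foldl aStep [] u) := foldl_NR u (List.isChain_nil)
  simp only [List.foldl_cons]
  rw [aStep_pop hnr hxy]

-- Source B's scan finds a genuine adjacent opposite pair at its index
theorem findPair_some_spec : ∀ {l : List String} {i : Nat}, findPair l = some i →
    ∃ x y, l = l.take i ++ x :: y :: l.drop (i + 2) ∧ oppositeDict.get? x = some y
  | x :: y :: rest, i, h => by
    rw [findPair] at h
    split at h
    · rename_i hxy
      simp only [Option.some.injEq] at h
      subst h
      exact ⟨x, y, by simp, hxy⟩
    · simp only [Option.map_eq_some_iff] at h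
      obtain ⟨j, hj, rfl⟩ := h
      obtain ⟨a, b, hdec, hab⟩ := findPair_some_spec hj
      refine ⟨a, b, ?_, hab⟩
      simp only [List.take_succ_cons, List.drop_succ_cons, List.cons_append]
      exact congrArg (x :: ·) hdec

-- main equivalence: the stack fold computes B's fixed point
theorem main_eq (l : List String) : List.foldl aStep [] l = bLoop l := by
  rw [bLoop.eq_def]
  split
  · rename_i i h
    have hle := findPair_le h
    obtain ⟨x, y, hdec, hxy⟩ := findPair_some_spec h
    have hrec := main_eq (l.take i ++ l.drop (i + 2))
    rw [← hrec, ← del_invariant (l.take i) (l.drop (i + 2)) hxy, ← hdec]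
  · rename_i h
    simpa using foldl_of_NR l (acc := []) (by simpa using findPair_none_iff.mp h)
termination_by l.length
decreasing_by
  simp only [List.length_append, List.length_take, List.length_drop]
  omega

-- ===== VERDICT (by name: the statement is the Claim_ definition above) =====
theorem dirReduc2_spec : Claim_equal_dirReduc2 := by
  intro plan _ _
  unfold Spec_dirReduc2 dirReduc2 dirReduc2_alt
  exact main_eq plan
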